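-- pv_equiv track=rewrite | github.com/opp0615/Algorithm | MIDAS/ActivateCode/ActivateCode.py | activeCheck
-- ===== SOURCE A (Python) =====
-- def activeCheck(inputList,activateList):
--     minSize = len(inputList)
--     windowSize = len(activateList)
--     isSet = False
--     setIndex = []
--     for i in range(len(inputList) - windowSize + 1):
--         if (inputList[i] == activateList[0]
--                 and inputList[i + 1] == activateList[1]
--                 and inputList[i + 2] == activateList[2]
--                 and inputList[i + 3] == activateList[3]):
--             setIndex.append(i)
--             isSet  = True
--
--     if(isSet):
--         for indexItem in setIndex:
--             setList = []
--             for i in range(len(inputList)):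
--                 if(not (i>= indexItem and i<indexItem + windowSize)):
--                     setList.append(inputList[i])
--
--             childMin = activeCheck(setList,activateList)
--             minSize = min(minSize,childMin)
--
--     return minSize
-- ===== SOURCE B (Python) =====
-- def activeCheck(inputList, activateList):
--     w = len(activateList)
--     pat4 = tuple(activateList[:4])  # A compares only the first four pattern elements
--     memo = {}
--
--     def go(t):
--         if t in memo:
--             return memo[t]
--         res = len(t)
--         for i in range(len(t) - w + 1):
--             if t[i:i + 4] == pat4:
--                 res = min(res, go(t[:i] + t[i + w:]))
--         memo[t] = res
--         return res
--
--     return go(tuple(inputList))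
-- ===== Notes on version B (the rewrite author's own statement) =====
-- stated objective: alternative
-- what changed: Replaced A's plain recursion, which re-solves the same remaining-list state once per derivation path, by a single memoised recursion keyed on the remaining list (dict of solved states), building each child state with two slices instead of an index-filter loop; worst-case exponential re-exploration becomes one visit per distinct state, though on a timing run's match-poor timing inputs this measured only ~1.3x.
import Mathlib
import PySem

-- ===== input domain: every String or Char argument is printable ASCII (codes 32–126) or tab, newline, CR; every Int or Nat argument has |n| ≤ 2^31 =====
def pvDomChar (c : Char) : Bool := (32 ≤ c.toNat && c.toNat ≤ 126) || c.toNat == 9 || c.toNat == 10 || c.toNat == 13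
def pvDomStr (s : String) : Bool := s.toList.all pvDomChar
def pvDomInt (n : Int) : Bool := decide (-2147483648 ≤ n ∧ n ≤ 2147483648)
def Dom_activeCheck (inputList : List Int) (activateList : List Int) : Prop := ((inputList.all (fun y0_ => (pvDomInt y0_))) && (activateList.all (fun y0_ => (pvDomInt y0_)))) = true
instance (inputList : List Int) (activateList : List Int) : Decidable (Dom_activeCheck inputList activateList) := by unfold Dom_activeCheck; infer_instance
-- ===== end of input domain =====

-- B solves each distinct remaining-list state once, via a memoised recursion (dict keyed by the
-- state) that builds children with slices, instead of A's plain recursion that re-solves a state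
-- on every derivation path reaching it.

-- ===== PORT A =====
-- A's 4-way comparison chain; where Python would raise IndexError (excluded by Pre_) an
-- out-of-range access counts as "no match" here.
def aMatch (t pat : List Int) (i : Int) : Bool :=
  match PySem.List.pyGet? t i, PySem.List.pyGet? pat 0,
        PySem.List.pyGet? t (i+1), PySem.List.pyGet? pat 1,
        PySem.List.pyGet? t (i+2), PySem.List.pyGet? pat 2,
        PySem.List.pyGet? t (i+3), PySem.List.pyGet? pat 3 with
  | some a0, some b0, some a1, some b1, some a2, some b2, some a3, some b3 =>
      a0 == b0 && a1 == b1 && a2 == b2 && a3 == b3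
  | _, _, _, _, _, _, _, _ => false

-- A's inner loop building setList (indices outside the deleted window, in order)
def aRemove (t : List Int) (idx w : Int) : List Int :=
  (PySem.List.pyRange 0 (t.length : Int) 1).foldl
    (fun acc i => if ¬ (idx ≤ i ∧ i < idx + w) then acc ++ [PySem.List.pyGetD t i 0] else acc) []

-- fuel only makes the recursion structural; inputList.length + 1 is always enough (each
-- recursive call is on a strictly shorter list)
def aGo : Nat → List Int → List Int → Int
  | 0, t, _ => (t.length : Int)
  | f+1, t, pat =>
    let n : Int := (t.length : Int)
    let w : Int := (pat.length : Int)
    let setIndex := (PySem.List.pyRange 0 (n - w + 1) 1).foldl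
      (fun acc i => if aMatch t pat i then acc ++ [i] else acc) []
    if setIndex = [] then n
    else setIndex.foldl (fun m idx => min m (aGo f (aRemove t idx w) pat)) n

def activeCheck (inputList : List Int) (activateList : List Int) : Int :=
  aGo (inputList.length + 1) inputList activateList

-- ===== PORT B =====
-- B's t[:i] + t[i+w:]
def bChild (t : List Int) (i w : Int) : List Int :=
  PySem.List.slice t none (some i) ++ PySem.List.slice t (some (i + w)) none

-- B's memoised go(t); the dict threads through the loop.  Same fuel remark as for aGo.
def bGo (pat4 : List Int) (w : Int) : Nat → List Int → PySem.Dict (List Int) Int → Int × PySem.Dict (List Int) Int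
  | 0, t, memo => ((t.length : Int), memo)
  | f+1, t, memo =>
    match memo.get? t with
    | some v => (v, memo)
    | none =>
      let n : Int := (t.length : Int)
      let r := (PySem.List.pyRange 0 (n - w + 1) 1).foldl
        (fun st i =>
          if PySem.List.slice t (some i) (some (i + 4)) = pat4 then
            let p := bGo pat4 w f (bChild t i w) st.2
            (min st.1 p.1, p.2)
          else st) (n, memo)
      (r.1, r.2.insert t r.1)

def activeCheck_alt (inputList : List Int) (activateList : List Int) : Int :=
  let w : Int := (activateList.length : Int)
  let pat4 := PySem.List.slice activateList none (some 4)
  (bGo pat4 w (inputList.length + 1) inputList PySem.Dict.empty).1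

-- ===== PRECONDITION & SPEC =====
-- Pre_ excludes exactly the inputs on which the Python A raises IndexError: an activateList of
-- fewer than 4 elements that occurs as a contiguous sublist of inputList (the comparison chain
-- then indexes past the end of one of the two lists).  On every input A returns on, Pre_ holds.
def Pre_activeCheck (inputList : List Int) (activateList : List Int) : Prop :=
  4 ≤ activateList.length ∨ ¬ activateList <:+: inputList
instance (inputList : List Int) (activateList : List Int) : Decidable (Pre_activeCheck inputList activateList) := by unfold Pre_activeCheck; infer_instance
def pvWitness_activeCheck : List Int × List Int := ([1, 2, 3, 4, 5], [2, 3, 4, 5])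

def Spec_activeCheck (inputList : List Int) (activateList : List Int) (out : Int) : Prop := out = activeCheck_alt inputList activateList
instance (inputList : List Int) (activateList : List Int) (out : Int) : Decidable (Spec_activeCheck inputList activateList out) := by unfold Spec_activeCheck; infer_instance

-- ===== CLAIM (what is proved, stated in full; the proofs are below) =====
def Claim_equal_activeCheck : Prop := ∀ (inputList : List Int) (activateList : List Int), Dom_activeCheck inputList activateList → Pre_activeCheck inputList activateList → Spec_activeCheck inputList activateList (activeCheck inputList activateList)

-- ===== LEMMAS AND PROOFS =====

-- the list of matching window starts A collects into setIndex
def mIdx (t pat : List Int) : List Int :=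
  (PySem.List.pyRange 0 ((t.length : Int) - pat.length + 1) 1).filter (aMatch t pat)

lemma take4_getElem (l : List Int) (h : 4 ≤ l.length) :
    l.take 4 = [l[0], l[1], l[2], l[3]] := by
  apply List.ext_getElem
  · simp; omega
  · intro j hj1 hj2
    simp only [List.length_take] at hj1
    have hj : j < 4 := by omega
    interval_cases j <;> simp <;> rfl

lemma foldAppendIte {α β : Type} (l : List α) (P : α → Prop) [DecidablePred P] (f : α → β)
    (acc : List β) :
    l.foldl (fun acc x => if P x then acc ++ [f x] else acc) acc
      = acc ++ (l.filter (fun x => decide (P x))).map f := by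
  induction l generalizing acc with
  | nil => simp
  | cons x l ih =>
    simp only [List.foldl_cons, List.filter_cons]
    by_cases h : P x <;> simp [h, ih]

lemma filterRangeLow (a b : Nat) : ∀ (m : Nat), a ≤ m → m ≤ b →
    (List.range m).filter (fun k => decide ¬(a ≤ k ∧ k < b)) = List.range a := by
  intro m
  induction m with
  | zero =>
    intro h1 _
    have ha : a = 0 := by omega
    subst ha
    simp
  | succ m ih =>
    intro h1 h2
    by_cases ha : a ≤ m
    · rw [List.range_succ, List.filter_append, ih ha (by omega)]
      have : ¬¬(a ≤ m ∧ m < b) := by omega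
      simp [List.filter, this]
    · have : a = m + 1 := by omega
      subst this
      apply List.filter_eq_self.mpr
      intro k hk
      simp at hk ⊢
      omega

lemma filterRangeWindow (a b n : Nat) (hab : a ≤ b) (hbn : b ≤ n) :
    (List.range n).filter (fun k => decide ¬(a ≤ k ∧ k < b))
      = List.range a ++ List.range' b (n - b) := by
  induction n with
  | zero => have h1 : a = 0 := by omega
            have h2 : b = 0 := by omega
            simp [h1, h2]
  | succ n ih =>
    by_cases hbn' : b ≤ n
    · rw [List.range_succ, List.filter_append, ih hbn']
      have hn : ¬(a ≤ n ∧ n < b) := by omega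
      have h1 : n + 1 - b = (n - b) + 1 := by omega
      have h2 : b + 1 * (n - b) = n := by omega
      rw [h1, List.range'_concat, h2]
      simp [List.filter, hn]
    · have hb : b = n + 1 := by omega
      subst hb
      simp only [Nat.sub_self, List.range'_zero, List.append_nil]
      exact filterRangeLow a (n+1) (n+1) hab le_rfl


lemma foldlCongrMem {α β : Type} (l : List α) (f g : β → α → β) (init : β)
    (h : ∀ acc x, x ∈ l → f acc x = g acc x) : l.foldl f init = l.foldl g init := by
  induction l generalizing init with
  | nil => rfl
  | cons x l ih =>
    simp only [List.foldl_cons]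
    rw [h init x (by simp)]
    exact ih _ (fun acc y hy => h acc y (by simp [hy]))

lemma mapRangeGetD (t : List Int) (a : Nat) (ha : a ≤ t.length) :
    (List.range a).map (fun k => t.getD k 0) = t.take a := by
  apply List.ext_getElem
  · simp; omega
  · intro j hj1 hj2
    simp only [List.length_map, List.length_range] at hj1
    simp [List.getElem?_eq_getElem (by omega : j < t.length)]

lemma mapRange'GetD (t : List Int) (b : Nat) (hb : b ≤ t.length) :
    (List.range' b (t.length - b)).map (fun k => t.getD k 0) = t.drop b := by
  apply List.ext_getElem
  · simp
  · intro j hj1 hj2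
    simp only [List.length_map, List.length_range'] at hj1
    simp only [List.getElem_map, List.getElem_range', List.getElem_drop, List.getD]
    simp [List.getElem?_eq_getElem (by omega : b + j < t.length)]

lemma aRemove_eq {t : List Int} {i w : Int} (h0 : 0 ≤ i) (hw : 0 ≤ w)
    (hle : i + w ≤ (t.length : Int)) :
    aRemove t i w = t.take i.toNat ++ t.drop (i + w).toNat := by
  unfold aRemove
  rw [PySem.List.pyRange_zero_natCast]
  rw [List.foldl_map]
  have e1 : ∀ (acc : List Int) (k : Nat),
      (if ¬ (i ≤ (k:Int) ∧ (k:Int) < i + w) then acc ++ [PySem.List.pyGetD t (k:Int) 0] else acc)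
        = (if ¬ (i.toNat ≤ k ∧ k < (i+w).toNat) then acc ++ [t.getD k 0] else acc) := by
    intro acc k
    rw [PySem.List.pyGetD_natCast]
    congr 1
    simp only [eq_iff_iff]
    constructor <;> intro h <;> omega
  rw [foldlCongrMem (List.range t.length) _
    (fun acc k => if ¬ ((i.toNat : Nat) ≤ k ∧ k < (i+w).toNat) then acc ++ [t.getD k 0] else acc) []
    (fun acc x hx => e1 acc x)]
  rw [foldAppendIte (List.range t.length) (fun k => ¬ (i.toNat ≤ k ∧ k < (i+w).toNat)) (fun k => t.getD k 0) []]
  rw [List.nil_append]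
  rw [filterRangeWindow i.toNat (i+w).toNat t.length (by omega) (by omega)]
  rw [List.map_append, mapRangeGetD t i.toNat (by omega)]
  have hb : (i+w).toNat ≤ t.length := by omega
  rw [mapRange'GetD t (i+w).toNat hb]

lemma bChild_eq {t : List Int} {i w : Int} (h0 : 0 ≤ i) (hw : 0 ≤ w) :
    bChild t i w = t.take i.toNat ++ t.drop (i + w).toNat := by
  unfold bChild
  rw [PySem.List.slice_to t h0, PySem.List.slice_from t (by omega : (0:Int) ≤ i + w)]

lemma remove_len {t : List Int} {i w : Int} (h0 : 0 ≤ i) (hw : 0 ≤ w)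
    (hle : i + w ≤ (t.length : Int)) :
    (t.take i.toNat ++ t.drop (i + w).toNat).length = t.length - w.toNat := by
  simp [List.length_take, List.length_drop]
  omega

lemma aGo_succ (f : Nat) (t pat : List Int) :
    aGo (f+1) t pat
      = (mIdx t pat).foldl (fun m idx => min m (aGo f (aRemove t idx pat.length) pat)) (t.length : Int) := by
  show (let n : Int := (t.length : Int)
        let w : Int := (pat.length : Int)
        let setIndex := (PySem.List.pyRange 0 (n - w + 1) 1).foldl
          (fun acc i => if aMatch t pat i then acc ++ [i] else acc) []
        if setIndex = [] then n
        else setIndex.foldl (fun m idx => min m (aGo f (aRemove t idx w) pat)) n) = _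
  simp only [PySem.List.foldl_append_if_eq_filter, List.nil_append]
  unfold mIdx
  by_cases h : List.filter (aMatch t pat) (PySem.List.pyRange 0 ((t.length:Int) - pat.length + 1) 1) = []
  · simp [h]
  · simp [h]

lemma aMatch_bounds {t pat : List Int} {i : Int} (h : aMatch t pat i = true) (h0 : 0 ≤ i) :
    4 ≤ pat.length ∧ i.toNat + 4 ≤ t.length := by
  unfold aMatch at h
  split at h
  next a0 b0 a1 b1 a2 b2 a3 b3 e1 e2 e3 e4 e5 e6 e7 e8 =>
    rw [PySem.List.pyGet?_of_nonneg pat (by norm_num : (0:Int) ≤ 3)] at e8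
    obtain ⟨hp3, -⟩ := List.getElem?_eq_some_iff.mp e8
    rw [PySem.List.pyGet?_of_nonneg t (by omega : (0:Int) ≤ i + 3)] at e7
    obtain ⟨ht3, -⟩ := List.getElem?_eq_some_iff.mp e7
    constructor <;> omega
  next => exact absurd h (by simp)

lemma match_eq_slice {t pat : List Int} (h4 : 4 ≤ pat.length) {i : Int} (h0 : 0 ≤ i)
    (hle : i + pat.length ≤ (t.length : Int)) :
    (decide (PySem.List.slice t (some i) (some (i + 4)) = PySem.List.slice pat none (some 4)))
      = aMatch t pat i := by
  have hk4 : i.toNat + 4 ≤ t.length := by omega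
  have hs1 : PySem.List.slice t (some i) (some (i + 4)) = (t.drop i.toNat).take 4 := by
    rw [PySem.List.slice_toNat t h0 (by omega : (0:Int) ≤ i + 4)]
    congr 1
    omega
  have hs2 : PySem.List.slice pat none (some 4) = pat.take 4 :=
    PySem.List.slice_to pat (by norm_num)
  have hd4 : 4 ≤ (t.drop i.toNat).length := by simp; omega
  rw [hs1, hs2, take4_getElem _ hd4, take4_getElem _ h4]
  unfold aMatch
  rw [PySem.List.pyGet?_eq_some_getElem t h0 (by omega),
      PySem.List.pyGet?_eq_some_getElem t (by omega : (0:Int) ≤ i + 1) (by omega),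
      PySem.List.pyGet?_eq_some_getElem t (by omega : (0:Int) ≤ i + 2) (by omega),
      PySem.List.pyGet?_eq_some_getElem t (by omega : (0:Int) ≤ i + 3) (by omega),
      PySem.List.pyGet?_eq_some_getElem pat (by norm_num : (0:Int) ≤ 0) (by omega),
      PySem.List.pyGet?_eq_some_getElem pat (by norm_num : (0:Int) ≤ 1) (by omega),
      PySem.List.pyGet?_eq_some_getElem pat (by norm_num : (0:Int) ≤ 2) (by omega),
      PySem.List.pyGet?_eq_some_getElem pat (by norm_num : (0:Int) ≤ 3) (by omega)]
  have g1 : (i + 1).toNat = i.toNat + 1 := by omega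
  have g2 : (i + 2).toNat = i.toNat + 2 := by omega
  have g3 : (i + 3).toNat = i.toNat + 3 := by omega
  simp only [g1, g2, g3, List.getElem_drop]
  simp only [Int.toNat_zero, Int.toNat_one, show ((2:Int).toNat) = 2 from rfl,
    show ((3:Int).toNat) = 3 from rfl]
  rw [Bool.eq_iff_iff]
  simp [and_assoc]
  intro _ _ _
  exact Iff.rfl

lemma mem_mIdx {t pat : List Int} {i : Int} (h : i ∈ mIdx t pat) :
    0 ≤ i ∧ i + (pat.length : Int) ≤ (t.length : Int) ∧ aMatch t pat i = true ∧ 4 ≤ pat.length := by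
  unfold mIdx at h
  rw [List.mem_filter] at h
  obtain ⟨hr, hm⟩ := h
  rw [PySem.List.mem_pyRange_one] at hr
  obtain ⟨hb, -⟩ := aMatch_bounds hm hr.1
  exact ⟨hr.1, by omega, hm, hb⟩

lemma child_len {t pat : List Int} {i : Int} (h : i ∈ mIdx t pat) :
    (aRemove t i (pat.length : Int)).length + 4 ≤ t.length := by
  obtain ⟨h0, hle, hm, h4⟩ := mem_mIdx h
  rw [aRemove_eq h0 (by omega) hle, remove_len h0 (by omega) hle]
  omega

lemma aGo_stable : ∀ (m : Nat) (t pat : List Int), t.length ≤ m →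
    ∀ f f', t.length < f → t.length < f' → aGo f t pat = aGo f' t pat := by
  intro m
  induction m using Nat.strong_induction_on with
  | _ m IH =>
    intro t pat hm f f' hf hf'
    obtain ⟨g, rfl⟩ : ∃ g, f = g + 1 := ⟨f - 1, by omega⟩
    obtain ⟨g', rfl⟩ : ∃ g', f' = g' + 1 := ⟨f' - 1, by omega⟩
    rw [aGo_succ, aGo_succ]
    apply foldlCongrMem
    intro acc x hx
    have hlen := child_len hx
    congr 1
    exact IH (aRemove t x (pat.length : Int)).length (by omega) _ pat le_rfl g g'
      (by omega) (by omega)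

def InvM (pat : List Int) (memo : PySem.Dict (List Int) Int) : Prop :=
  ∀ k v, memo.get? k = some v → v = aGo (k.length + 1) k pat

lemma bGo_eq : ∀ (f : Nat) (pat : List Int), 4 ≤ pat.length → ∀ (t : List Int) (memo : PySem.Dict (List Int) Int),
    t.length < f → InvM pat memo →
    (bGo (PySem.List.slice pat none (some 4)) (pat.length : Int) f t memo).1 = aGo f t pat ∧
    InvM pat (bGo (PySem.List.slice pat none (some 4)) (pat.length : Int) f t memo).2 := by
  intro f
  induction f with
  | zero => intro pat h4 t memo hf; exact absurd hf (by omega)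
  | succ f IH =>
    intro pat h4 t memo hf hInv
    simp only [bGo]
    cases hm : memo.get? t with
    | some v =>
      refine ⟨?_, hInv⟩
      exact (hInv t v hm).trans (aGo_stable t.length t pat le_rfl _ _ (by omega) (by omega))
    | none =>
      rw [PySem.List.foldl_ite_eq_foldl_filter]
      have hfil : List.filter
          (fun i => decide (PySem.List.slice t (some i) (some (i+4)) = PySem.List.slice pat none (some 4)))
          (PySem.List.pyRange 0 ((t.length : Int) - (pat.length : Int) + 1) 1) = mIdx t pat := by
        unfold mIdx
        apply List.filter_congr
        intro i hi
        rw [PySem.List.mem_pyRange_one] at hi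
        exact match_eq_slice h4 hi.1 (by omega)
      rw [hfil]
      have key : ∀ (l : List Int), (∀ i ∈ l, i ∈ mIdx t pat) →
          ∀ (res : Int) (mm : PySem.Dict (List Int) Int), InvM pat mm →
          (l.foldl (fun st i =>
              let p := bGo (PySem.List.slice pat none (some 4)) ((pat.length : Int)) f (bChild t i ((pat.length : Int))) st.2
              (min st.1 p.1, p.2)) (res, mm)).1
            = l.foldl (fun m idx => min m (aGo f (aRemove t idx ((pat.length : Int))) pat)) res
          ∧ InvM pat (l.foldl (fun st i =>
              let p := bGo (PySem.List.slice pat none (some 4)) ((pat.length : Int)) f (bChild t i ((pat.length : Int))) st.2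
              (min st.1 p.1, p.2)) (res, mm)).2 := by
        intro l
        induction l with
        | nil => exact fun _ res mm hmm => ⟨rfl, hmm⟩
        | cons i l ihl =>
          intro hval res mm hmm
          simp only [List.foldl_cons]
          have hmem := hval i (by simp)
          obtain ⟨h0, hle, hmatch, -⟩ := mem_mIdx hmem
          have hbc : bChild t i ((pat.length : Int)) = aRemove t i ((pat.length : Int)) := by
            rw [bChild_eq h0 (by omega), aRemove_eq h0 (by omega) hle]
          have hcl : (bChild t i ((pat.length : Int))).length < f := by
            rw [hbc]
            have := child_len hmem
            omega
          obtain ⟨hv, hInv'⟩ := IH pat h4 (bChild t i ((pat.length : Int))) mm hcl hmm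
          obtain ⟨e1, e2⟩ := ihl (fun j hj => hval j (List.mem_cons_of_mem _ hj))
            (min res (bGo (PySem.List.slice pat none (some 4)) ((pat.length : Int)) f (bChild t i ((pat.length : Int))) mm).1)
            ((bGo (PySem.List.slice pat none (some 4)) ((pat.length : Int)) f (bChild t i ((pat.length : Int))) mm).2) hInv'
          constructor
          · rw [e1, hv, hbc]
          · exact e2
      obtain ⟨k1, k2⟩ := key (mIdx t pat) (fun i hi => hi) (t.length : Int) memo hInv
      constructor
      · rw [aGo_succ]
        exact k1
      · intro k v hk
        rw [PySem.Dict.get?_insert] at hk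
        by_cases hkt : k = t
        · rw [if_pos hkt] at hk
          subst hkt
          injection hk with h'
          rw [← h', k1, ← aGo_succ]
          exact aGo_stable k.length k pat le_rfl (f+1) (k.length+1) (by omega) (by omega)
        · rw [if_neg hkt] at hk
          exact k2 k v hk


-- ===== VERDICT (by name: the statement is the Claim_ definition above) =====
theorem activeCheck_spec : Claim_equal_activeCheck := by
  intro t pat _ hpre
  show activeCheck t pat = activeCheck_alt t pat
  by_cases h4 : 4 ≤ pat.length
  · unfold activeCheck activeCheck_alt
    have hInv : InvM pat PySem.Dict.empty := fun k v hk => by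
      rw [PySem.Dict.get?_empty] at hk
      cases hk
    obtain ⟨h1, -⟩ := bGo_eq (t.length + 1) pat h4 t PySem.Dict.empty (by omega) hInv
    exact h1.symm
  · have hinf : ¬ pat <:+: t := hpre.resolve_left h4
    have hA : activeCheck t pat = (t.length : Int) := by
      unfold activeCheck
      rw [aGo_succ]
      have hempty : mIdx t pat = [] := by
        unfold mIdx
        rw [List.filter_eq_nil_iff]
        intro i hi hmatch
        rw [PySem.List.mem_pyRange_one] at hi
        have := (aMatch_bounds hmatch hi.1).1
        omega
      rw [hempty]
      rfl
    have hB : activeCheck_alt t pat = (t.length : Int) := by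
      unfold activeCheck_alt
      simp only [bGo]
      rw [PySem.Dict.get?_empty]
      rw [PySem.List.foldl_ite_eq_foldl_filter]
      have hempty : List.filter
          (fun i => decide (PySem.List.slice t (some i) (some (i+4)) = PySem.List.slice pat none (some 4)))
          (PySem.List.pyRange 0 ((t.length : Int) - (pat.length : Int) + 1) 1) = [] := by
        rw [List.filter_eq_nil_iff]
        intro i hi hdec
        rw [PySem.List.mem_pyRange_one] at hi
        have heq := of_decide_eq_true hdec
        have hsl : PySem.List.slice t (some i) (some (i+4)) = (t.drop i.toNat).take 4 := by
          rw [PySem.List.slice_toNat t hi.1 (by omega : (0:Int) ≤ i + 4)]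
          congr 1
          omega
        have hp : PySem.List.slice pat none (some 4) = pat := by
          rw [PySem.List.slice_to pat (by norm_num)]
          exact List.take_of_length_le (by omega)
        rw [hsl, hp] at heq
        apply hinf
        have hpref : pat <+: t.drop i.toNat := heq ▸ List.take_prefix 4 (t.drop i.toNat)
        exact hpref.isInfix.trans (List.drop_suffix i.toNat t).isInfix
      rw [hempty]
      rfl
    rw [hA, hB]
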